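-- pv_equiv track=rewrite | github.com/danielsofran/UBB | A1/Semestrul 1/FP/Lab/lab3/Tema/Tema/secvente.py | din_interval
-- ===== SOURCE A (Python) =====
-- def din_interval(lista, interval=(0, 10)):
--     # returneaza secventele de lungime maxima ale caror elemente apartin intervalului dat
--     rez = []
--     l = []
--     lmax = 0
--     for elem in lista:
--         if(elem >= interval[0] and elem <= interval[1]):
--             l.append(elem)
--             if len(l)>lmax:
--                 lmax = len(l)
--                 rez.clear()
--                 rez.append(l)
--             elif len(l)==lmax:
--                 rez.append(l)
--         else: l = []
--     return rez
-- ===== SOURCE B (Python) =====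
-- def din_interval(lista, interval=(0, 10)):
--     # two-phase: materialize all maximal in-interval runs, then keep the longest ones
--     runs = []
--     cur = []
--     for x in lista:
--         if interval[0] <= x <= interval[1]:
--             cur.append(x)
--         else:
--             if cur:
--                 runs.append(cur)
--             cur = []
--     if cur:
--         runs.append(cur)
--     m = max((len(r) for r in runs), default=0)
--     return [r for r in runs if len(r) == m] if m > 0 else []
-- ===== Notes on version B (the rewrite author's own statement) =====
-- stated objective: simpler
-- what changed: Replaces the online best-run tracking (current run, running max, clear-and-append result list) with a two-phase structure: first materialize all maximal in-interval runs, then filter them by the maximum length.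
import Mathlib
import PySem

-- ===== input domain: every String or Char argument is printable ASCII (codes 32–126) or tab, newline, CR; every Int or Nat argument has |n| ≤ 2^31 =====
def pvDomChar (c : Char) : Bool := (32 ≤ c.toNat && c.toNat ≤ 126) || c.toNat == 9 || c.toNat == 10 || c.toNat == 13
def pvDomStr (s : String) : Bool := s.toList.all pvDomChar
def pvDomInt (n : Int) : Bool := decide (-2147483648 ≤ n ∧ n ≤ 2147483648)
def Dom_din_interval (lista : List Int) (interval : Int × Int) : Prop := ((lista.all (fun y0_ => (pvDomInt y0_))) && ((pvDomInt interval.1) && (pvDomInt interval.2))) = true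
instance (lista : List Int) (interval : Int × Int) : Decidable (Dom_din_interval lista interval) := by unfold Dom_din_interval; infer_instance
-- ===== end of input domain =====

-- B replaces A's online best-run tracking with a simpler two-phase structure
-- (materialize all in-interval runs, then filter by the maximum length); equal return values.


-- ===== PORT A =====
-- state (rez, l, lmax); note: in Python rez holds the live list l, but every growth of l
-- re-clears and re-appends it (len(l) > lmax fires again), so snapshot semantics give the same value
def stepA (interval : Int × Int) (s : List (List Int) × List Int × Nat) (elem : Int) :
    List (List Int) × List Int × Nat :=
  let rez := s.1; let l := s.2.1; let lmax := s.2.2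
  if elem ≥ interval.1 ∧ elem ≤ interval.2 then
    let l' := l ++ [elem]
    if l'.length > lmax then ([l'], l', l'.length)
    else if l'.length = lmax then (rez ++ [l'], l', lmax)
    else (rez, l', lmax)
  else (rez, ([] : List Int), lmax)

def din_interval (lista : List Int) (interval : Int × Int) : List (List Int) :=
  (lista.foldl (stepA interval) ([], [], 0)).1

-- ===== PORT B =====
-- append the pending run (if nonempty) to the list of completed runs
def pvFlush (rs : List (List Int)) (cur : List Int) : List (List Int) :=
  if cur = [] then rs else rs ++ [cur]

def stepB (interval : Int × Int) (p : List (List Int) × List Int) (x : Int) :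
    List (List Int) × List Int :=
  if interval.1 ≤ x ∧ x ≤ interval.2 then (p.1, p.2 ++ [x])
  else (pvFlush p.1 p.2, [])

def din_interval_alt (lista : List Int) (interval : Int × Int) : List (List Int) :=
  let s := lista.foldl (stepB interval) ([], [])
  let runs := pvFlush s.1 s.2
  let m := (runs.map List.length).foldl max 0   -- max(..., default=0)
  if 0 < m then runs.filter (fun r => r.length = m) else []

-- ===== PRECONDITION & SPEC =====
def Spec_din_interval (lista : List Int) (interval : Int × Int) (out : List (List Int)) : Prop := out = din_interval_alt lista interval
instance (lista : List Int) (interval : Int × Int) (out : List (List Int)) : Decidable (Spec_din_interval lista interval out) := by unfold Spec_din_interval; infer_instance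

-- ===== CLAIM (what is proved, stated in full; the proofs are below) =====
def Claim_equal_din_interval : Prop := ∀ (lista : List Int) (interval : Int × Int), Dom_din_interval lista interval → Spec_din_interval lista interval (din_interval lista interval)

-- ===== LEMMAS AND PROOFS =====

/-- max length over a list of runs (Python's `max(map(len, rs), default=0)`). -/
def mxl (rs : List (List Int)) : Nat := (rs.map List.length).foldl max 0

theorem pvFlush_nil (rs : List (List Int)) : pvFlush rs [] = rs := by simp [pvFlush]

theorem pvFlush_cons (rs : List (List Int)) {cur : List Int} (h : cur ≠ []) :
    pvFlush rs cur = rs ++ [cur] := by simp [pvFlush, h]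

theorem mxl_append_singleton (rs : List (List Int)) (a : List Int) :
    mxl (rs ++ [a]) = max (mxl rs) a.length := by
  simp [mxl, List.foldl_append]

theorem length_le_mxl {a : List Int} {rs : List (List Int)} (h : a ∈ rs) :
    a.length ≤ mxl rs := by
  exact (PySem.List.le_foldl_max (rs.map List.length) 0).2 _ (List.mem_map_of_mem h)

theorem mxl_flush_ge (rs : List (List Int)) (cur : List Int) :
    mxl rs ≤ mxl (pvFlush rs cur) := by
  by_cases hc : cur = []
  · rw [hc, pvFlush_nil]
  · rw [pvFlush_cons _ hc, mxl_append_singleton]; exact Nat.le_max_left _ _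

/-- filtering by a length strictly above every member's length gives []. -/
theorem filter_len_gt (rs : List (List Int)) (m : Nat) (h : mxl rs < m) :
    rs.filter (fun r => r.length = m) = [] := by
  rw [List.filter_eq_nil_iff]
  intro a ha
  have := length_le_mxl ha
  simp only [decide_eq_true_eq]
  omega

/-- loop invariant: A's state (rez, cur, lmax) corresponds to B's state (rs, cur). -/
theorem loop_equiv (interval : Int × Int) (xs : List Int) :
    ∀ (rez : List (List Int)) (cur : List Int) (lmax : Nat) (rs : List (List Int)),
    lmax = mxl (pvFlush rs cur) →
    rez = (if 0 < lmax then (pvFlush rs cur).filter (fun r => r.length = lmax) else []) →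
    (xs.foldl (stepA interval) (rez, cur, lmax)).1 =
      (let s := xs.foldl (stepB interval) (rs, cur)
       let runs := pvFlush s.1 s.2
       let m := mxl runs
       if 0 < m then runs.filter (fun r => r.length = m) else []) := by
  induction xs with
  | nil =>
    intro rez cur lmax rs h1 h2
    subst h1
    simp only [List.foldl_nil]
    exact h2
  | cons x xs ih =>
    intro rez cur lmax rs h1 h2
    simp only [List.foldl_cons]
    by_cases hin : interval.1 ≤ x ∧ x ≤ interval.2
    · have hstepB : stepB interval (rs, cur) x = (rs, cur ++ [x]) := by
        unfold stepB; rw [if_pos hin]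
      have hmrs : mxl rs ≤ lmax := h1 ▸ mxl_flush_ge rs cur
      have hlen : (cur ++ [x]).length = cur.length + 1 := by simp
      have hne : (cur ++ [x]) ≠ [] := by simp
      rcases Nat.lt_trichotomy lmax (cur ++ [x]).length with hgt | heq | hlt
      · -- new run strictly longer: A clears rez
        have hstepA : stepA interval (rez, cur, lmax) x
            = ([cur ++ [x]], cur ++ [x], (cur ++ [x]).length) := by
          simp only [stepA]
          rw [if_pos hin, if_pos hgt]
        rw [hstepA]
        simp only [hstepB]
        apply ih
        · rw [pvFlush_cons _ hne, mxl_append_singleton]; omega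
        · rw [pvFlush_cons _ hne, if_pos (by omega), List.filter_append,
            filter_len_gt rs _ (by omega)]
          simp
      · -- tie: A appends
        have hpos : 0 < lmax := by omega
        have hstepA : stepA interval (rez, cur, lmax) x
            = (rez ++ [cur ++ [x]], cur ++ [x], lmax) := by
          simp only [stepA]
          rw [if_pos hin, if_neg (by omega), if_pos heq.symm]
        have hfin : List.filter (fun r => r.length = lmax) (pvFlush rs cur)
            = List.filter (fun r => r.length = lmax) rs := by
          by_cases hc : cur = []
          · rw [hc, pvFlush_nil]
          · rw [pvFlush_cons _ hc, List.filter_append]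
            have : ¬ (cur.length = lmax) := by omega
            simp [this]
        rw [hstepA]
        simp only [hstepB]
        apply ih
        · rw [pvFlush_cons _ hne, mxl_append_singleton]; omega
        · rw [pvFlush_cons _ hne, if_pos hpos, List.filter_append,
            h2, if_pos hpos, hfin]
          have : (cur ++ [x]).length = lmax := heq.symm
          simp [this]
      · -- shorter than lmax: nothing changes in A
        have hpos : 0 < lmax := by omega
        have hstepA : stepA interval (rez, cur, lmax) x = (rez, cur ++ [x], lmax) := by
          simp only [stepA]
          rw [if_pos hin, if_neg (by omega), if_neg (by omega)]
        have hrs : mxl rs = lmax := by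
          by_cases hc : cur = []
          · rw [hc, pvFlush_nil] at h1; omega
          · rw [pvFlush_cons _ hc, mxl_append_singleton] at h1; omega
        have hfin : List.filter (fun r => r.length = lmax) (pvFlush rs cur)
            = List.filter (fun r => r.length = lmax) rs := by
          by_cases hc : cur = []
          · rw [hc, pvFlush_nil]
          · rw [pvFlush_cons _ hc, List.filter_append]
            have : ¬ (cur.length = lmax) := by omega
            simp [this]
        rw [hstepA]
        simp only [hstepB]
        apply ih
        · rw [pvFlush_cons _ hne, mxl_append_singleton]; omega
        · rw [pvFlush_cons _ hne, if_pos hpos, List.filter_append,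
            h2, if_pos hpos, hfin]
          have h3 : ¬ (cur.length + 1 = lmax) := by omega
          simp [h3]
    · -- out of interval: A resets cur, B flushes
      have hstepA : stepA interval (rez, cur, lmax) x = (rez, [], lmax) := by
        simp only [stepA]
        rw [if_neg hin]
      have hstepB : stepB interval (rs, cur) x = (pvFlush rs cur, []) := by
        unfold stepB; rw [if_neg hin]
      rw [hstepA]
      simp only [hstepB]
      apply ih
      · rw [pvFlush_nil]; exact h1
      · rw [pvFlush_nil]; exact h2

-- ===== VERDICT (by name: the statement is the Claim_ definition above) =====
theorem din_interval_spec : Claim_equal_din_interval := by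
  intro lista interval _
  show din_interval lista interval = din_interval_alt lista interval
  exact loop_equiv interval lista [] [] 0 [] rfl (by simp)
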